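-- pv_equiv track=rewrite | github.com/adijays17/HackerRankCoding | DiagaonalSum.py | digLen
-- ===== SOURCE A (Python) =====
-- def digLen(arr):
--     d1=0
--     d2=0
--     for i in range(len(arr)):
--         for j in range(len(arr)):
--             if i==j:
--                 d1 = d1+arr[i][j]
--             if i+j==len(arr)-1:
--                 d2 = d2+arr[i][j]
--     dif=d1-d2
--     if dif<0:
--         dif = dif*-1
--     return dif
-- ===== SOURCE B (Python) =====
-- def digLen(arr):
--     n = len(arr)
--     d = 0
--     for i, row in enumerate(arr):
--         d += row[i] - row[n - 1 - i]
--     return abs(d)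
-- ===== Notes on version B (the rewrite author's own statement) =====
-- stated objective: faster
-- what changed: replaced the O(n^2) nested loop with equality tests on every cell by a single pass over enumerate(arr) that directly adds arr[i][i] - arr[i][n-1-i], then abs
import Mathlib
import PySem

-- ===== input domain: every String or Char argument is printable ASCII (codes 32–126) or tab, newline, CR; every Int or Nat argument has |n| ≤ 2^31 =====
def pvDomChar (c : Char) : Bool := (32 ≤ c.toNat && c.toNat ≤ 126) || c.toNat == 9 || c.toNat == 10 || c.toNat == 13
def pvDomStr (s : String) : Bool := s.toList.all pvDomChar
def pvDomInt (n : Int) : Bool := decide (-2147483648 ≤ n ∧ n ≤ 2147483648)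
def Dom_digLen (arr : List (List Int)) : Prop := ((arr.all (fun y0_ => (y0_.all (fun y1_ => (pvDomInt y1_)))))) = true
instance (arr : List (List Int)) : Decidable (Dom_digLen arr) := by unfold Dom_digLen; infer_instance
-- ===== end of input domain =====

-- B replaces A's O(n^2) nested scan by a single pass adding arr[i][i] - arr[i][n-1-i]; measurably faster (asymptotic).


-- ===== PORT A =====
def digLen (arr : List (List Int)) : Int :=
  let n : Int := (arr.length : Int)
  let p :=
    (PySem.List.pyRange 0 n 1).foldl (fun (q : Int × Int) i =>
      (PySem.List.pyRange 0 n 1).foldl (fun (q : Int × Int) j =>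
        (if i = j then q.1 + PySem.List.pyGetD (PySem.List.pyGetD arr i []) j 0 else q.1,
         if i + j = n - 1 then q.2 + PySem.List.pyGetD (PySem.List.pyGetD arr i []) j 0 else q.2)) q)
      (0, 0)
  let dif := p.1 - p.2
  if dif < 0 then dif * (-1) else dif

-- ===== PORT B =====
def digLen_alt (arr : List (List Int)) : Int :=
  let n : Int := (arr.length : Int)
  let d := (PySem.List.enumerate arr 0).foldl
    (fun d p => d + (PySem.List.pyGetD p.2 p.1 0 - PySem.List.pyGetD p.2 (n - 1 - p.1) 0)) 0
  |d|

-- ===== PRECONDITION & SPEC =====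
-- Pre_ excludes exactly the ragged matrices on which Python A (and B) raise IndexError:
-- some row i is too short to hold the needed diagonal entries arr[i][i] and arr[i][n-1-i].
def Pre_digLen (arr : List (List Int)) : Prop :=
  ∀ i < arr.length, i < (arr.getD i []).length ∧ arr.length - 1 - i < (arr.getD i []).length
instance (arr : List (List Int)) : Decidable (Pre_digLen arr) := by unfold Pre_digLen; infer_instance
def pvWitness_digLen : List (List Int) := [[1, 2], [3, 4]]

def Spec_digLen (arr : List (List Int)) (out : Int) : Prop := out = digLen_alt arr
instance (arr : List (List Int)) (out : Int) : Decidable (Spec_digLen arr out) := by unfold Spec_digLen; infer_instance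

-- ===== CLAIM (what is proved, stated in full; the proofs are below) =====
def Claim_equal_digLen : Prop := ∀ (arr : List (List Int)), Dom_digLen arr → Pre_digLen arr → Spec_digLen arr (digLen arr)

-- ===== LEMMAS AND PROOFS =====

-- a pair-valued fold with independent components splits into two folds
theorem pv_foldl_pair (f g : Int → Int → Int) :
    ∀ (l : List Int) (a b : Int),
      l.foldl (fun (q : Int × Int) j => (f q.1 j, g q.2 j)) (a, b) = (l.foldl f a, l.foldl g b) := by
  intro l
  induction l with
  | nil => intro a b; simp
  | cons x xs ih => intro a b; simp [List.foldl_cons, ih]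

-- a guarded accumulation over a list where the guard never fires is the identity
theorem pv_foldl_if_none (p : Int → Prop) [DecidablePred p] (g : Int → Int) :
    ∀ (l : List Int), (∀ j ∈ l, ¬ p j) → ∀ (a : Int),
      l.foldl (fun s j => if p j then s + g j else s) a = a := by
  intro l
  induction l with
  | nil => intro _ a; simp
  | cons x xs ih =>
    intro h a
    have hx : ¬ p x := h x (by simp)
    simp only [List.foldl_cons, if_neg hx]
    exact ih (fun j hj => h j (by simp [hj])) a

-- a guarded accumulation over range(lo, hi) whose guard fires exactly at t ∈ [lo, hi) adds g t once
theorem pv_foldl_if_one (p : Int → Prop) [DecidablePred p] (g : Int → Int) (t : Int)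
    (hp : ∀ j, p j ↔ j = t) :
    ∀ (k : Nat) (lo hi a : Int), (t - lo).toNat = k → lo ≤ t → t < hi →
      (PySem.List.pyRange lo hi 1).foldl (fun s j => if p j then s + g j else s) a = a + g t := by
  intro k
  induction k with
  | zero =>
    intro lo hi a hk h1 h2
    have hlt : t = lo := by omega
    subst hlt
    rw [PySem.List.pyRange_one_cons (by omega)]
    simp only [List.foldl_cons, if_pos ((hp t).mpr rfl)]
    exact pv_foldl_if_none p g _ (fun j hj => by
      have := (PySem.List.mem_pyRange_one).mp hj
      intro hpj; have := (hp j).mp hpj; omega) _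
  | succ k ih =>
    intro lo hi a hk h1 h2
    have hlo : lo < t := by omega
    rw [PySem.List.pyRange_one_cons (by omega)]
    simp only [List.foldl_cons, if_neg (fun hpl => by have := (hp lo).mp hpl; omega)]
    exact ih (lo + 1) hi a (by omega) (by omega) h2

-- additive fold = initial value plus the sum over the list
theorem pv_foldl_add_sum {α : Type} (f : α → Int) :
    ∀ (l : List α) (a : Int),
      l.foldl (fun s x => s + f x) a = a + (l.map f).sum := by
  intro l
  induction l with
  | nil => intro a; simp
  | cons x xs ih => intro a; simp [List.foldl_cons, ih]; ring

-- sum over enumerate xs s, expressed over positions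
theorem pv_sum_enumerate (G : Int → List Int → Int) :
    ∀ (xs : List (List Int)) (s : Int),
      ((PySem.List.enumerate xs s).map (fun p => G p.1 p.2)).sum
        = ((List.range xs.length).map (fun (k : Nat) => G (s + (k : Int)) (xs.getD k []))).sum := by
  intro xs
  induction xs with
  | nil => intro s; simp [PySem.List.enumerate_nil]
  | cons x xs ih =>
    intro s
    rw [PySem.List.enumerate_cons, List.map_cons, List.sum_cons, ih (s + 1),
      List.length_cons, List.range_succ_eq_map, List.map_cons, List.sum_cons, List.map_map]
    congr 1
    · simp
    · apply congrArg List.sum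
      apply List.map_congr_left
      intro k _
      simp only [Function.comp_def, List.getD_cons_succ]
      congr 1
      push_cast; ring

-- sum over pyRange 0 n 1 as a sum over List.range
theorem pv_sum_pyRange (h : Int → Int) (N : Nat) :
    ((PySem.List.pyRange 0 (N : Int) 1).map h).sum
      = ((List.range N).map (fun (k : Nat) => h (k : Int))).sum := by
  have hN : ((N : Int) - 0).toNat = N := by omega
  rw [PySem.List.pyRange_one, hN, List.map_map]
  exact congrArg _ (List.map_congr_left (fun k _ => by simp))

-- sums subtract pointwise
theorem pv_sum_sub {α : Type} (f g : α → Int) :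
    ∀ (l : List α), (l.map (fun x => f x - g x)).sum = (l.map f).sum - (l.map g).sum := by
  intro l
  induction l with
  | nil => simp
  | cons x xs ih => simp [ih]; ring

-- the central identity: A's pair of diagonal sums and B's signed accumulator agree
theorem pv_core (arr : List (List Int)) :
    digLen arr = digLen_alt arr := by
  simp only [digLen, digLen_alt]
  set n : Int := (arr.length : Int) with hn
  have hconv : (PySem.List.pyRange 0 n 1).foldl (fun (q : Int × Int) i =>
      (PySem.List.pyRange 0 n 1).foldl (fun (q : Int × Int) j =>
        (if i = j then q.1 + PySem.List.pyGetD (PySem.List.pyGetD arr i []) j 0 else q.1,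
         if i + j = n - 1 then q.2 + PySem.List.pyGetD (PySem.List.pyGetD arr i []) j 0 else q.2)) q)
      ((0 : Int), (0 : Int))
      = (PySem.List.pyRange 0 n 1).foldl (fun (q : Int × Int) i =>
          (q.1 + PySem.List.pyGetD (PySem.List.pyGetD arr i []) i 0,
           q.2 + PySem.List.pyGetD (PySem.List.pyGetD arr i []) (n - 1 - i) 0)) (0, 0) := by
    apply PySem.List.foldl_congr_mem
    intro q i hi
    obtain ⟨hi0, hi1⟩ := (PySem.List.mem_pyRange_one).mp hi
    obtain ⟨a, b⟩ := q
    rw [pv_foldl_pair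
      (fun s j => if i = j then s + PySem.List.pyGetD (PySem.List.pyGetD arr i []) j 0 else s)
      (fun s j => if i + j = n - 1 then s + PySem.List.pyGetD (PySem.List.pyGetD arr i []) j 0 else s)]
    simp only [Prod.mk.injEq]
    constructor
    · exact pv_foldl_if_one (fun j => i = j) _ i (fun j => by constructor <;> omega)
        (i - 0).toNat 0 n a rfl (by omega) (by omega)
    · exact pv_foldl_if_one (fun j => i + j = n - 1) _ (n - 1 - i) (fun j => by constructor <;> omega)
        ((n - 1 - i) - 0).toNat 0 n b rfl (by omega) (by omega)
  rw [hconv, pv_foldl_pair (fun s i => s + PySem.List.pyGetD (PySem.List.pyGetD arr i []) i 0)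
        (fun s i => s + PySem.List.pyGetD (PySem.List.pyGetD arr i []) (n - 1 - i) 0)]
  rw [pv_foldl_add_sum, pv_foldl_add_sum,
      pv_foldl_add_sum (fun p : Int × List Int => PySem.List.pyGetD p.2 p.1 0 - PySem.List.pyGetD p.2 (n - 1 - p.1) 0)]
  rw [pv_sum_enumerate (fun i row => PySem.List.pyGetD row i 0 - PySem.List.pyGetD row (n - 1 - i) 0)]
  rw [hn, pv_sum_pyRange, pv_sum_pyRange, pv_sum_sub]
  simp only [zero_add, PySem.List.pyGetD_natCast]
  set S := ((List.range arr.length).map (fun k => PySem.List.pyGetD (arr.getD k []) ((arr.length : Int) - 1 - (k : Int)) 0)).sum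
  set T := ((List.range arr.length).map (fun k => (arr.getD k []).getD k 0)).sum
  rcases lt_or_ge (T - S) 0 with h | h
  · rw [if_pos h, abs_of_neg h]; ring
  · rw [if_neg (by omega), abs_of_nonneg h]

-- ===== VERDICT (by name: the statement is the Claim_ definition above) =====
theorem digLen_spec : Claim_equal_digLen := by
  intro arr _ _
  unfold Spec_digLen
  exact pv_core arr
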